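-- pv_equiv track=rewrite | github.com/sridhar281994/7grid | routers/match_routes.py | _select_coin_for_auto
-- ===== SOURCE A (Python) =====
-- from typing import Dict, Optional
--
-- COINS_PER_PLAYER = 2
--
-- FINAL_BOX_INDEX = 8
--
-- def _select_coin_for_auto(coins: list[int]) -> Optional[int]:
--     for idx, pos in enumerate(coins[:COINS_PER_PLAYER]):
--         if 0 <= pos < FINAL_BOX_INDEX:
--             return idx
--     for idx, pos in enumerate(coins[:COINS_PER_PLAYER]):
--         if pos < 0:
--             return idx
--     return None
-- ===== SOURCE B (Python) =====
-- from typing import Optional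
--
-- COINS_PER_PLAYER = 2
-- FINAL_BOX_INDEX = 8
--
-- def _select_coin_for_auto(coins: list[int]) -> Optional[int]:
--     # single pass: return first in-range coin; remember first negative as fallback
--     fallback = None
--     for idx, pos in enumerate(coins[:COINS_PER_PLAYER]):
--         if 0 <= pos < FINAL_BOX_INDEX:
--             return idx
--         if pos < 0 and fallback is None:
--             fallback = idx
--     return fallback
-- ===== Notes on version B (the rewrite author's own statement) =====
-- stated objective: simpler
-- what changed: The two sequential enumerate loops over the slice are collapsed into one pass that returns the first in-range index immediately and maintains the first negative index as a fallback returned after the loop.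
import Mathlib
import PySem

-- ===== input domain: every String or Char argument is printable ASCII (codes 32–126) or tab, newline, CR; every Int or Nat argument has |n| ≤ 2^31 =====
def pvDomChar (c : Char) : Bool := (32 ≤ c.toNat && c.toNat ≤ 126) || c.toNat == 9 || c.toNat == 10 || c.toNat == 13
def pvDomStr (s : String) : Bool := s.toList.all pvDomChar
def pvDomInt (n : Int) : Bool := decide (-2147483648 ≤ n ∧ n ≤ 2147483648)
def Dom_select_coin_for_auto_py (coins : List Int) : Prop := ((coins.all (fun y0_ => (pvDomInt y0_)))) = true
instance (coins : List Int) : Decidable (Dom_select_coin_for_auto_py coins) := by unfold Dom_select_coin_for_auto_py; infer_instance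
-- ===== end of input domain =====

-- B collapses A's two sequential scans into one pass with a maintained fallback index (objective: simpler).
-- ===== PORT A =====
-- first loop: for idx, pos in enumerate(coins[:2]): if 0 <= pos < 8: return idx
def selA_loop1 : Int → List Int → Option Int
  | _, [] => none
  | i, p :: rest => if 0 ≤ p ∧ p < 8 then some i else selA_loop1 (i + 1) rest

-- second loop: for idx, pos in enumerate(coins[:2]): if pos < 0: return idx
def selA_loop2 : Int → List Int → Option Int
  | _, [] => none
  | i, p :: rest => if p < 0 then some i else selA_loop2 (i + 1) rest

def select_coin_for_auto_py (coins : List Int) : Option Int :=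
  let cs := PySem.List.slice coins none (some 2)  -- coins[:COINS_PER_PLAYER]
  match selA_loop1 0 cs with
  | some i => some i
  | none => selA_loop2 0 cs

-- ===== PORT B =====
-- single pass: return first in-range index; remember first negative index as fallback
def selB_loop : Int → Option Int → List Int → Option Int
  | _, fb, [] => fb
  | i, fb, p :: rest =>
      if 0 ≤ p ∧ p < 8 then some i
      else selB_loop (i + 1) (if p < 0 ∧ fb = none then some i else fb) rest

def select_coin_for_auto_py_alt (coins : List Int) : Option Int :=
  selB_loop 0 none (PySem.List.slice coins none (some 2))


-- ===== PRECONDITION & SPEC =====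
def Spec_select_coin_for_auto_py (coins : List Int) (out : Option Int) : Prop := out = select_coin_for_auto_py_alt coins
instance (coins : List Int) (out : Option Int) : Decidable (Spec_select_coin_for_auto_py coins out) := by unfold Spec_select_coin_for_auto_py; infer_instance

-- ===== CLAIM (what is proved, stated in full; the proofs are below) =====
def Claim_equal_select_coin_for_auto_py : Prop := ∀ (coins : List Int), Dom_select_coin_for_auto_py coins → Spec_select_coin_for_auto_py coins (select_coin_for_auto_py coins)

-- ===== LEMMAS AND PROOFS =====

-- ===== VERDICT (by name: the statement is the Claim_ definition above) =====
theorem select_coin_for_auto_py_spec : Claim_equal_select_coin_for_auto_py := by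
  intro coins _
  unfold Spec_select_coin_for_auto_py select_coin_for_auto_py select_coin_for_auto_py_alt
  rcases coins with _ | ⟨a, _ | ⟨b, t⟩⟩ <;>
    simp [PySem.List.slice, selA_loop1, selA_loop2, selB_loop] <;>
    split_ifs <;> simp_all <;> omega
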